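-- pv_equiv track=rewrite | github.com/GlorijaDoslo/Genome_informatics_project | optimizations.py | find_occurrences_to_the_checkpoint
-- ===== SOURCE A (Python) =====
-- def find_occurrences_to_the_checkpoint(bwt_string, limit_index, char_to_find, tally_checkpoint):
--     """
--     Called when certain character is not in tally matrix. Finds that character in BWT last column
--     and counts the occurrences of it. Counting stops when the tally checkpoint is reached.
--
--     Parameters:
--         bwt_string (str): The last column of BWT matrix.
--         limit_index (int): Starting index for character search.
--         char_to_find (str): Character to be found.
--         tally_checkpoint (int): Checkpoint where values are found.
--
--     Returns:
--         current_index (int): Index of found character in the checkpoint.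
--         count (int): Number of occurrences of the character in the way to the checkpoint.
--     """
--
--     count = 0
--     current_index = limit_index
--
--     while current_index % tally_checkpoint != 0:
--         if bwt_string[current_index] == char_to_find:
--             count = count + 1
--         current_index = current_index - 1
--
--     return current_index, count
-- ===== SOURCE B (Python) =====
-- def find_occurrences_to_the_checkpoint(bwt_string, limit_index, char_to_find, tally_checkpoint):
--     checkpoint = limit_index - limit_index % abs(tally_checkpoint)
--     count = sum(1 for c in bwt_string[checkpoint + 1:limit_index + 1] if c == char_to_find)
--     return checkpoint, count
-- ===== Notes on version B (the rewrite author's own statement) =====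
-- stated objective: simpler
-- what changed: Replaces A's decrement-and-test backward loop with a closed-form checkpoint index (limit_index - limit_index % abs(tally_checkpoint)) and a single per-character count over the slice bwt_string[checkpoint+1:limit_index+1].
-- outside the precondition, e.g. on find_occurrences_to_the_checkpoint('ab', -1, 'b', 2): A returns (-2, 1), B returns (-2, 0)
import Mathlib
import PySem

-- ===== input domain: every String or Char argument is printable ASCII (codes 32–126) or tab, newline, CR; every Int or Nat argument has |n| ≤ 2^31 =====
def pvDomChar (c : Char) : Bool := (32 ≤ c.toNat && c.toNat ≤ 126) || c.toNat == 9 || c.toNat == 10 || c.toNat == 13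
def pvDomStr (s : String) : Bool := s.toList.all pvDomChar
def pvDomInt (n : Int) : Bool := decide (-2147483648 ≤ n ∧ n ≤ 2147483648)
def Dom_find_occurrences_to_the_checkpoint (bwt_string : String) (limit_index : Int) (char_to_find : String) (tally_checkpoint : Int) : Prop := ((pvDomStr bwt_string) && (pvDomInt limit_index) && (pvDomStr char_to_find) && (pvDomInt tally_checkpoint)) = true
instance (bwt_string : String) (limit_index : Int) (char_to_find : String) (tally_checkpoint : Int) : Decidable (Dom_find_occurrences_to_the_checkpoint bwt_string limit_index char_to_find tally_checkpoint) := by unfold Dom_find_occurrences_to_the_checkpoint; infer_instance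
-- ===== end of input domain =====

-- B replaces A's decrement-and-test loop by a closed-form checkpoint (limit_index - limit_index % abs(tally_checkpoint)) and a windowed count over one slice; objective: simpler.
-- ===== PORT A =====
-- while-loop of A, made total with a fuel counter (fuel = |tally_checkpoint| suffices on Pre_;
-- the fuel-0 branch and the none branch of pyGet? (= IndexError) are unreachable under Pre_).
def pvLoopA (bwt_string char_to_find : String) (tally_checkpoint : Int) :
    Nat → Int → Int → Int × Int
  | 0, current_index, count => (current_index, count)
  | fuel + 1, current_index, count =>
    if PySem.Int.mod current_index tally_checkpoint ≠ 0 then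
      let count' :=
        match PySem.Str.pyGet? bwt_string current_index with
        | some c => if [c] = char_to_find.toList then count + 1 else count
        | none => count
      pvLoopA bwt_string char_to_find tally_checkpoint fuel (current_index - 1) count'
    else (current_index, count)

def find_occurrences_to_the_checkpoint (bwt_string : String) (limit_index : Int) (char_to_find : String) (tally_checkpoint : Int) : Int × Int :=
  pvLoopA bwt_string char_to_find tally_checkpoint tally_checkpoint.natAbs limit_index 0

-- ===== PORT B =====
def find_occurrences_to_the_checkpoint_alt (bwt_string : String) (limit_index : Int) (char_to_find : String) (tally_checkpoint : Int) : Int × Int :=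
  let checkpoint := limit_index - PySem.Int.mod limit_index (tally_checkpoint.natAbs : Int)
  let window := PySem.List.slice bwt_string.toList (some (checkpoint + 1)) (some (limit_index + 1))
  (checkpoint, (window.countP (fun c => decide ([c] = char_to_find.toList)) : Int))

-- ===== PRECONDITION & SPEC =====
-- Pre_ excludes exactly the inputs where the Python A raises (tally_checkpoint = 0: ZeroDivisionError;
-- the loop runs with limit_index ≥ len(bwt_string): IndexError) and, because negative starting indices are
-- outside the function's natural domain (an index into the BWT column), negative limit_index that enters
-- the loop, where A reads characters only via Python's negative-index wraparound.
def Pre_find_occurrences_to_the_checkpoint (bwt_string : String) (limit_index : Int) (char_to_find : String) (tally_checkpoint : Int) : Prop :=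
  tally_checkpoint ≠ 0 ∧
    (PySem.Int.mod limit_index tally_checkpoint = 0 ∨
      (0 ≤ limit_index ∧ limit_index < (bwt_string.toList.length : Int)))
instance (bwt_string : String) (limit_index : Int) (char_to_find : String) (tally_checkpoint : Int) : Decidable (Pre_find_occurrences_to_the_checkpoint bwt_string limit_index char_to_find tally_checkpoint) := by unfold Pre_find_occurrences_to_the_checkpoint; infer_instance
def pvWitness_find_occurrences_to_the_checkpoint : String × Int × String × Int := ("abab", 3, "a", 2)
def Spec_find_occurrences_to_the_checkpoint (bwt_string : String) (limit_index : Int) (char_to_find : String) (tally_checkpoint : Int) (out : Int × Int) : Prop := out = find_occurrences_to_the_checkpoint_alt bwt_string limit_index char_to_find tally_checkpoint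
instance (bwt_string : String) (limit_index : Int) (char_to_find : String) (tally_checkpoint : Int) (out : Int × Int) : Decidable (Spec_find_occurrences_to_the_checkpoint bwt_string limit_index char_to_find tally_checkpoint out) := by unfold Spec_find_occurrences_to_the_checkpoint; infer_instance

-- ===== CLAIM (what is proved, stated in full; the proofs are below) =====
def Claim_equal_find_occurrences_to_the_checkpoint : Prop := ∀ (bwt_string : String) (limit_index : Int) (char_to_find : String) (tally_checkpoint : Int), Dom_find_occurrences_to_the_checkpoint bwt_string limit_index char_to_find tally_checkpoint → Pre_find_occurrences_to_the_checkpoint bwt_string limit_index char_to_find tally_checkpoint → Spec_find_occurrences_to_the_checkpoint bwt_string limit_index char_to_find tally_checkpoint (find_occurrences_to_the_checkpoint bwt_string limit_index char_to_find tally_checkpoint)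

-- ===== LEMMAS AND PROOFS =====

-- mod by the divisor is 0 exactly when |divisor| divides (Nat side)
theorem pv_mod_zero_iff (j : Nat) (t : Int) (_ht : t ≠ 0) :
    PySem.Int.mod (j : Int) t = 0 ↔ j % t.natAbs = 0 := by
  rw [PySem.Int.mod_eq_zero_iff_dvd]
  constructor
  · intro h
    have h2 : (t.natAbs : Int) ∣ (j : Int) := (Int.natAbs_dvd).mpr h
    have h3 : t.natAbs ∣ j := Int.ofNat_dvd.mp h2
    exact Nat.dvd_iff_mod_eq_zero.mp h3
  · intro h
    have h3 : t.natAbs ∣ j := Nat.dvd_of_mod_eq_zero h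
    exact (Int.natAbs_dvd).mp (Int.ofNat_dvd.mpr h3)

-- the loop of A, on an in-range Nat index, computes the closed-form checkpoint and the windowed count
theorem pvLoopA_eq (bwt char : String) (t : Int) (ht : t ≠ 0) :
    ∀ (fuel : Nat) (j : Nat) (count : Int), j < bwt.toList.length → j % t.natAbs < fuel →
      pvLoopA bwt char t fuel (j : Int) count =
        (((j - j % t.natAbs : Nat) : Int),
          count + (((bwt.toList.drop (j - j % t.natAbs + 1)).take (j % t.natAbs)).countP
            (fun c => decide ([c] = char.toList)) : Int)) := by
  intro fuel
  induction fuel with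
  | zero => intro j count _ h; omega
  | succ fuel ih =>
    intro j count hj hfuel
    by_cases h0 : j % t.natAbs = 0
    · rw [pvLoopA]
      rw [if_neg (by simp [pv_mod_zero_iff j t ht, h0])]
      simp [h0]
    · have hT : 0 < t.natAbs := by positivity
      have hj1 : 1 ≤ j := by
        rcases Nat.eq_zero_or_pos j with h | h
        · subst h; simp at h0
        · exact h
      obtain ⟨r, hr⟩ : ∃ r, j % t.natAbs = r + 1 := ⟨j % t.natAbs - 1, by omega⟩
      rw [pvLoopA]
      rw [if_pos (by simp [pv_mod_zero_iff j t ht, h0])]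
      have hget : PySem.Str.pyGet? bwt (j : Int) = some (bwt.toList[j]'hj) := by
        simp [List.getElem?_eq_getElem hj]
      have hcast : ((j : Int) - 1) = ((j - 1 : Nat) : Int) := by omega
      have hmod : (j - 1) % t.natAbs = r := by
        have hdm := Nat.div_add_mod j t.natAbs
        have hlt := Nat.mod_lt j hT
        have hjj : j - 1 = t.natAbs * (j / t.natAbs) + r := by omega
        rw [hjj, Nat.mul_add_mod]
        exact Nat.mod_eq_of_lt (by omega)
      have hlen1 : j - 1 < bwt.toList.length := by omega
      have hfuel1 : (j - 1) % t.natAbs < fuel := by rw [hmod]; omega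
      rw [hget, hcast, ih (j-1) _ hlen1 hfuel1, hmod, hr]
      have hcp : j - 1 - r = j - (r + 1) := by omega
      rw [hcp]
      have hrj : r ≤ j - 1 := hmod ▸ Nat.mod_le (j - 1) _
      have hidx : j - (r + 1) + 1 + r = j := by omega
      have htake : (bwt.toList.drop (j - (r+1) + 1)).take (r + 1)
          = (bwt.toList.drop (j - (r+1) + 1)).take r ++ [bwt.toList[j]'hj] := by
        rw [List.take_add_one]
        congr 1
        rw [List.getElem?_drop, hidx, List.getElem?_eq_getElem hj]
        rfl
      rw [htake, List.countP_append]
      simp only [List.countP_cons, List.countP_nil]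
      by_cases hc : [bwt.toList[j]'hj] = char.toList <;> simp [hc] <;> omega

-- the slice B takes is exactly the drop/take window
theorem pv_alt_eq (bwt char : String) (t : Int) (ht : t ≠ 0) (j : Nat) :
    find_occurrences_to_the_checkpoint_alt bwt (j : Int) char t =
      (((j - j % t.natAbs : Nat) : Int),
        (((bwt.toList.drop (j - j % t.natAbs + 1)).take (j % t.natAbs)).countP
          (fun c => decide ([c] = char.toList)) : Int)) := by
  have hT : 0 < t.natAbs := by positivity
  unfold find_occurrences_to_the_checkpoint_alt
  have hmod : PySem.Int.mod (j : Int) (t.natAbs : Int) = ((j % t.natAbs : Nat) : Int) :=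
    PySem.Int.mod_natCast j t.natAbs
  have hle : j % t.natAbs ≤ j := Nat.mod_le j _
  have hcp : (j : Int) - PySem.Int.mod (j : Int) (t.natAbs : Int) = ((j - j % t.natAbs : Nat) : Int) := by
    rw [hmod]; omega
  simp only [hcp]
  have ha : ((j - j % t.natAbs : Nat) : Int) + 1 = ((j - j % t.natAbs + 1 : Nat) : Int) := by push_cast; ring
  have hb : (j : Int) + 1 = ((j + 1 : Nat) : Int) := by push_cast; ring
  rw [ha, hb, PySem.List.slice_natCast]
  have hn : j + 1 - (j - j % t.natAbs + 1) = j % t.natAbs := by omega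
  rw [hn]

-- ===== VERDICT (by name: the statement is the Claim_ definition above) =====
theorem find_occurrences_to_the_checkpoint_spec : Claim_equal_find_occurrences_to_the_checkpoint := by
  intro bwt li char t _ hpre
  obtain ⟨ht, hcase⟩ := hpre
  unfold Spec_find_occurrences_to_the_checkpoint find_occurrences_to_the_checkpoint
  rcases hcase with hmod0 | ⟨hli0, hlen⟩
  · -- limit_index % tally_checkpoint == 0: the loop never runs, both return (limit_index, 0)
    obtain ⟨k, hk⟩ : ∃ k, t.natAbs = k + 1 := ⟨t.natAbs - 1, by omega⟩
    rw [hk, pvLoopA, if_neg (by simp [hmod0])]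
    have hdvd : (t.natAbs : Int) ∣ li := by
      rw [Int.natAbs_dvd]; exact (PySem.Int.mod_eq_zero_iff_dvd li t).mp hmod0
    have hmodN : PySem.Int.mod li (t.natAbs : Int) = 0 :=
      (PySem.Int.mod_eq_zero_iff_dvd li (t.natAbs : Int)).mpr hdvd
    unfold find_occurrences_to_the_checkpoint_alt
    simp only [hmodN, sub_zero]
    have hwin : PySem.List.slice bwt.toList (some (li + 1)) (some (li + 1)) = ([] : List Char) := by
      apply List.eq_nil_of_length_eq_zero
      rw [PySem.List.length_slice]; omega
    rw [hwin]; simp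
  · -- 0 ≤ limit_index < len: reduce both sides to the windowed count
    obtain ⟨j, hj⟩ : ∃ j : Nat, li = (j : Int) := ⟨li.toNat, by omega⟩
    subst hj
    have hjlen : j < bwt.toList.length := by exact_mod_cast hlen
    have hT : 0 < t.natAbs := by positivity
    rw [pvLoopA_eq bwt char t ht t.natAbs j 0 hjlen (Nat.mod_lt j hT),
        pv_alt_eq bwt char t ht j]
    simp
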